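-- pv_equiv track=rewrite | github.com/SepehrRasouli/SimpleAndShortPrograms | Electrons Configuration calculator/Electrons Configuration calculator.py | ion_charge_calculator
-- ===== SOURCE A (Python) =====
-- def ion_charge_calculator(ion_charge,mountain_afba_fillin):
--     if ion_charge:
--         if int(ion_charge):
--             mountain_afba_fillin = list([i,j] for i,j in mountain_afba_fillin.items())
--             ion_charge = int(ion_charge)
--             if ion_charge > 0:
--                 for row in mountain_afba_fillin[::-1]:
--                     if ion_charge > 0:
--                         if row[1]:
--                             if int(row[1]) > 0:
--                                 while int(row[1]) > 0 and ion_charge > 0: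
--                                     row[1] -= 1
--                                     ion_charge -= 1
--                                     continue
--                                 else:
--                                     pass
--
--                         else:
--                             continue
--                 else:
--                     mountain_afba_fillin = {key:value for key,value in mountain_afba_fillin}
--
--             else:
--                 for row in mountain_afba_fillin[::-1]:
--                     if row[1] and ion_charge != 0:
--                         if int(row[1]) > 0:
--                             done = False
--                             while not done:
--                                 if row[0].endswith("s"):
--                                     max = 2
--                                 elif row[0].endswith("p"):
--                                     max = 6
--                                 elif row[0].endswith("d"):
--                                     max = 10
--                                 else:
--                                     max = 14
--                                 if row[1] < max:
--
--                                     row[1] = int(row[1])  + 1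
--                                     ion_charge += 1
--                                     continue
--                                 else:
--                                     done = True
--                             else:
--                                 pass
--
--                     else:
--                         continue
--                 else:
--                     mountain_afba_fillin = {key:value for key,value in mountain_afba_fillin}
--
--     return mountain_afba_fillin
-- ===== SOURCE B (Python) =====
-- def _cap(name):
--     last = name[-1:]
--     return 2 if last == "s" else 6 if last == "p" else 10 if last == "d" else 14
--
--
-- def ion_charge_calculator(ion_charge, mountain_afba_fillin):
--     charge = int(ion_charge)
--     if charge == 0:
--         return mountain_afba_fillin
--     out = []
--     if charge > 0:
--         # removing electrons: drain each shell (back to front) by one arithmetic delta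
--         for key, val in reversed(list(mountain_afba_fillin.items())):
--             if val > 0 and charge > 0:
--                 take = min(val, charge)
--                 out.append((key, val - take))
--                 charge -= take
--             else:
--                 out.append((key, val))
--     else:
--         # adding electrons: top up each touched shell (back to front) to its capacity
--         for key, val in reversed(list(mountain_afba_fillin.items())):
--             if val > 0 and charge != 0:
--                 cap = _cap(key)
--                 if val < cap:
--                     charge += cap - val
--                     out.append((key, cap))
--                 else:
--                     out.append((key, val))
--             else:
--                 out.append((key, val))
--     return {key: val for key, val in reversed(out)}
-- ===== Notes on version B (the rewrite author's own statement) =====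
-- stated objective: faster
-- what changed: B replaces A's unit-by-unit while loops (decrement/increment one electron at a time per shell) with a single arithmetic delta per shell (min(val, charge) when removing, cap - val when topping up), in one pass over the shells with an accumulator.
import Mathlib
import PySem

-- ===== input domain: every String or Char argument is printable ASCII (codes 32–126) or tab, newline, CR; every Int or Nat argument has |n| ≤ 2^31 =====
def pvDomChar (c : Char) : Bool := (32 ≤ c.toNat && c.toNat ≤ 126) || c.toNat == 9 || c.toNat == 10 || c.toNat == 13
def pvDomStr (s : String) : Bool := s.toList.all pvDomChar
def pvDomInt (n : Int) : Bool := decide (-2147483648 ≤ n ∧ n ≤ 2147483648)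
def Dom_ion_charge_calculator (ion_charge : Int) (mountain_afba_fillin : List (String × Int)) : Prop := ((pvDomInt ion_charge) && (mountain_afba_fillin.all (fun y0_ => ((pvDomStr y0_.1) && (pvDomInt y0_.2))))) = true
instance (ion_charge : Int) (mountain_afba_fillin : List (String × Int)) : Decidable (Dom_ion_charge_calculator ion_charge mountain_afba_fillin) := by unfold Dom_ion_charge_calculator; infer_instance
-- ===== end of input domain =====

-- B replaces A's unit-by-unit while loops by one arithmetic delta per shell (min / cap-v): objective 'faster' (O(shells) vs O(shells·|delta|)).


-- ===== PORT A =====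
-- max = 2/6/10/14 by the endswith chain in A's negative branch
def pvCapA (k : String) : Int :=
  if PySem.Str.endswith k "s" then 2
  else if PySem.Str.endswith k "p" then 6
  else if PySem.Str.endswith k "d" then 10
  else 14

-- `while int(row[1]) > 0 and ion_charge > 0: row[1] -= 1; ion_charge -= 1`
def pvDrainA (v q : Int) : Int × Int :=
  if 0 < v ∧ 0 < q then pvDrainA (v - 1) (q - 1) else (v, q)
termination_by v.toNat
decreasing_by omega

-- the `done` loop: `if row[1] < max: row[1] += 1; ion_charge += 1 else: done = True`
def pvFillA (cap v q : Int) : Int × Int :=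
  if v < cap then pvFillA cap (v + 1) (q + 1) else (v, q)
termination_by (cap - v).toNat
decreasing_by omega

-- `for row in mountain_afba_fillin[::-1]` (positive charge): argument is the reversed list
def pvPosA : List (String × Int) → Int → List (String × Int) × Int
  | [], q => ([], q)
  | (k, v) :: rest, q =>
    let s := if 0 < q then (if v ≠ 0 then (if 0 < v then pvDrainA v q else (v, q)) else (v, q)) else (v, q)
    let r := pvPosA rest s.2
    ((k, s.1) :: r.1, r.2)

-- `for row in mountain_afba_fillin[::-1]` (negative charge)
def pvNegA : List (String × Int) → Int → List (String × Int) × Int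
  | [], q => ([], q)
  | (k, v) :: rest, q =>
    let s := if v ≠ 0 ∧ q ≠ 0 then (if 0 < v then pvFillA (pvCapA k) v q else (v, q)) else (v, q)
    let r := pvNegA rest s.2
    ((k, s.1) :: r.1, r.2)

def ion_charge_calculator (ion_charge : Int) (mountain_afba_fillin : List (String × Int)) : List (String × Int) :=
  if ion_charge ≠ 0 then
    if 0 < ion_charge then
      (PySem.Dict.ofList ((pvPosA mountain_afba_fillin.reverse ion_charge).1.reverse)).items
    else
      (PySem.Dict.ofList ((pvNegA mountain_afba_fillin.reverse ion_charge).1.reverse)).items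
  else mountain_afba_fillin

-- ===== PORT B =====
-- _cap: last = name[-1:]; 2/6/10/14 by comparing the one-character suffix
def pvCapB (name : String) : Int :=
  let last := PySem.Str.slice name (some (-1)) none
  if last == "s" then 2 else if last == "p" then 6 else if last == "d" then 10 else 14

-- loop body of B's positive branch (out is appended to, final list reversed)
def pvStepPosB (st : Int × List (String × Int)) (kv : String × Int) : Int × List (String × Int) :=
  if 0 < kv.2 ∧ 0 < st.1 then
    (st.1 - min kv.2 st.1, st.2 ++ [(kv.1, kv.2 - min kv.2 st.1)])
  else (st.1, st.2 ++ [kv])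

-- loop body of B's negative branch
def pvStepNegB (st : Int × List (String × Int)) (kv : String × Int) : Int × List (String × Int) :=
  if 0 < kv.2 ∧ st.1 ≠ 0 then
    if kv.2 < pvCapB kv.1 then
      (st.1 + (pvCapB kv.1 - kv.2), st.2 ++ [(kv.1, pvCapB kv.1)])
    else (st.1, st.2 ++ [kv])
  else (st.1, st.2 ++ [kv])

def ion_charge_calculator_alt (ion_charge : Int) (mountain_afba_fillin : List (String × Int)) : List (String × Int) :=
  if ion_charge == 0 then mountain_afba_fillin
  else
    let out :=
      if 0 < ion_charge then
        (mountain_afba_fillin.reverse.foldl pvStepPosB (ion_charge, [])).2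
      else
        (mountain_afba_fillin.reverse.foldl pvStepNegB (ion_charge, [])).2
    (PySem.Dict.ofList out.reverse).items

-- ===== PRECONDITION & SPEC =====
def Spec_ion_charge_calculator (ion_charge : Int) (mountain_afba_fillin : List (String × Int)) (out : List (String × Int)) : Prop := out = ion_charge_calculator_alt ion_charge mountain_afba_fillin
instance (ion_charge : Int) (mountain_afba_fillin : List (String × Int)) (out : List (String × Int)) : Decidable (Spec_ion_charge_calculator ion_charge mountain_afba_fillin out) := by unfold Spec_ion_charge_calculator; infer_instance

-- ===== CLAIM (what is proved, stated in full; the proofs are below) =====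
def Claim_equal_ion_charge_calculator : Prop := ∀ (ion_charge : Int) (mountain_afba_fillin : List (String × Int)), Dom_ion_charge_calculator ion_charge mountain_afba_fillin → Spec_ion_charge_calculator ion_charge mountain_afba_fillin (ion_charge_calculator ion_charge mountain_afba_fillin)

-- ===== LEMMAS AND PROOFS =====

-- closed form of A's unit drain loop
theorem pvDrainA_eq (v q : Int) : pvDrainA v q = (v - max 0 (min v q), q - max 0 (min v q)) := by
  fun_induction pvDrainA v q with
  | case1 v q h ih => rw [ih]; simp only [Prod.mk.injEq]; omega
  | case2 v q h => simp only [Prod.mk.injEq]; omega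

-- closed form of A's unit fill loop
theorem pvFillA_eq (cap v q : Int) : pvFillA cap v q = (v + max 0 (cap - v), q + max 0 (cap - v)) := by
  fun_induction pvFillA cap v q with
  | case1 v q h ih => rw [ih]; simp only [Prod.mk.injEq]; omega
  | case2 v q h => simp only [Prod.mk.injEq]; omega

-- a one-character suffix test reads the last character
theorem pvEndsSingle (k : String) (l : List Char) (a : Char) (h : k.toList = l ++ [a]) (c : Char) :
    PySem.Chars.endswith k.toList [c] = decide (a = c) := by
  by_cases hac : a = c
  · subst hac
    have : [a] <:+ k.toList := ⟨l, by simp [h]⟩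
    simp [(PySem.Chars.endswith_iff k.toList [a]).mpr this]
  · have hns : ¬ ([c] <:+ k.toList) := by
      rintro ⟨t, ht⟩
      rw [h] at ht
      have := congrArg List.getLast? ht
      simp at this
      exact hac this.symm
    have : PySem.Chars.endswith k.toList [c] ≠ true := fun hb => hns ((PySem.Chars.endswith_iff k.toList [c]).mp hb)
    simp [hac, Bool.eq_false_iff.mpr this]

-- the two capacity helpers agree
theorem pvCap_eq (k : String) : pvCapA k = pvCapB k := by
  rcases List.eq_nil_or_concat k.toList with h | ⟨l, a, h⟩
  · have hk : k = "" := by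
      have := congrArg String.ofList h
      simpa using this
    subst hk; decide
  · rw [List.concat_eq_append] at h
    have hslice : PySem.Str.slice k (some (-1)) none = String.ofList [a] := by
      have ht : (PySem.Str.slice k (some (-1)) none).toList = [a] := by
        rw [PySem.Str.toList_slice, PySem.Chars.slice_eq_listSlice, PySem.List.slice_from_neg_one, h]
        simp
      have := congrArg String.ofList ht
      simpa using this
    have hend : ∀ c : Char, ∀ s : String, s.toList = [c] →
        PySem.Str.endswith k s = decide (a = c) := by
      intro c s hs
      rw [PySem.Str.endswith_eq, hs]
      exact pvEndsSingle k l a h c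
    have hbeq : ∀ c : Char, ∀ s : String, s.toList = [c] →
        (String.ofList [a] == s) = decide (a = c) := by
      intro c s hs
      have hsc : s = String.ofList [c] := by
        have := congrArg String.ofList hs
        simpa using this
      by_cases hac : a = c
      · simp [hsc, hac]
      · have hne : String.ofList [a] ≠ String.ofList [c] := by
          intro hc
          have := congrArg String.toList hc
          simp at this
          exact hac this
        simp [hsc, hac, hne]
    simp only [pvCapA, pvCapB, hslice,
      hend 's' "s" (by simp), hend 'p' "p" (by simp), hend 'd' "d" (by simp),
      hbeq 's' "s" (by simp), hbeq 'p' "p" (by simp), hbeq 'd' "d" (by simp)]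

-- B's positive fold computes A's positive loop, with the rows accumulated in front
theorem pvPos_agree (rev : List (String × Int)) : ∀ (q : Int) (out : List (String × Int)),
    rev.foldl pvStepPosB (q, out) = ((pvPosA rev q).2, out ++ (pvPosA rev q).1) := by
  induction rev with
  | nil => intro q out; simp [pvPosA]
  | cons kv rest ih =>
    intro q out
    obtain ⟨k, v⟩ := kv
    simp only [List.foldl_cons, pvPosA]
    by_cases hv : 0 < v ∧ 0 < q
    · have hvne : v ≠ 0 := by omega
      have hd := pvDrainA_eq v q
      have hm : max 0 (min v q) = min v q := by omega
      rw [hm] at hd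
      rw [show pvStepPosB (q, out) (k, v) = (q - min v q, out ++ [(k, v - min v q)]) from by
            simp [pvStepPosB, hv], ih]
      simp [hv.1, hv.2, hvne, hd]
    · have hstep : pvStepPosB (q, out) (k, v) = (q, out ++ [(k, v)]) := by
        simp [pvStepPosB, hv]
      have hA : (if 0 < q then (if v ≠ 0 then (if 0 < v then pvDrainA v q else (v, q)) else (v, q)) else (v, q)) = (v, q) := by
        by_cases hq : 0 < q
        · have hvle : ¬ 0 < v := fun hh => hv ⟨hh, hq⟩
          by_cases hv0 : v = 0 <;> simp [hq, hv0, hvle]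
        · simp [hq]
      rw [hstep, ih, hA]
      simp

-- B's negative fold computes A's negative loop, with the rows accumulated in front
theorem pvNeg_agree (rev : List (String × Int)) : ∀ (q : Int) (out : List (String × Int)),
    rev.foldl pvStepNegB (q, out) = ((pvNegA rev q).2, out ++ (pvNegA rev q).1) := by
  induction rev with
  | nil => intro q out; simp [pvNegA]
  | cons kv rest ih =>
    intro q out
    obtain ⟨k, v⟩ := kv
    simp only [List.foldl_cons, pvNegA]
    by_cases hv : 0 < v ∧ q ≠ 0
    · have hf := pvFillA_eq (pvCapA k) v q
      have hAcond : (v ≠ 0 ∧ q ≠ 0) := ⟨by omega, hv.2⟩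
      by_cases hlt : v < pvCapB k
      · have hlt' : v < pvCapA k := by rw [pvCap_eq]; exact hlt
        have hm : max 0 (pvCapA k - v) = pvCapA k - v := by omega
        rw [hm] at hf
        have hf' : pvFillA (pvCapA k) v q = (pvCapA k, q + (pvCapA k - v)) := by
          rw [hf]; congr 1; omega
        have hstep : pvStepNegB (q, out) (k, v) = (q + (pvCapA k - v), out ++ [(k, pvCapA k)]) := by
          simp only [pvStepNegB, ← pvCap_eq]
          rw [if_pos hv, if_pos hlt']
        rw [hstep, ih]
        simp [hAcond, hv.1, hf']
      · have hlt' : ¬ v < pvCapA k := by rw [pvCap_eq]; exact hlt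
        have hm : max 0 (pvCapA k - v) = 0 := by omega
        rw [hm] at hf
        have hstep : pvStepNegB (q, out) (k, v) = (q, out ++ [(k, v)]) := by
          simp [pvStepNegB, hv, hlt]
        rw [hstep, ih]
        simp [hAcond, hv.1, hf]
    · have hstep : pvStepNegB (q, out) (k, v) = (q, out ++ [(k, v)]) := by
        simp [pvStepNegB, hv]
      have hA : (if v ≠ 0 ∧ q ≠ 0 then (if 0 < v then pvFillA (pvCapA k) v q else (v, q)) else (v, q)) = (v, q) := by
        by_cases hc : v ≠ 0 ∧ q ≠ 0
        · have : ¬ 0 < v := fun hh => hv ⟨hh, hc.2⟩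
          simp [hc, this]
        · simp [hc]
      rw [hstep, ih, hA]
      simp

-- ===== VERDICT (by name: the statement is the Claim_ definition above) =====
theorem ion_charge_calculator_spec : Claim_equal_ion_charge_calculator := by
  intro q l _
  unfold Spec_ion_charge_calculator ion_charge_calculator ion_charge_calculator_alt
  by_cases hq : q = 0
  · simp [hq]
  · by_cases hpos : 0 < q
    · simp only [if_pos (show q ≠ 0 from hq), if_pos hpos, beq_iff_eq, if_neg hq]
      rw [pvPos_agree]
      simp
    · simp only [if_pos (show q ≠ 0 from hq), if_neg hpos, beq_iff_eq, if_neg hq]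
      rw [pvNeg_agree]
      simp
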